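-- pv_equiv track=rewrite | github.com/BobAnkh/TPCCA | utils/area.py | wnd_detect
-- ===== SOURCE A (Python) =====
-- def wnd_detect(time_list, start_wnd_time, start_wnd_seq, end_time, wnd_size):
--     '''
--     Search a best match point of the window end from the time sequence.
--
--     Args:
--         time_list (list): the whole time sequence
--         start_wnd_time (int or float): window start time
--         start_wnd_seq (int): window start time sequence number in time_list
--         end_time (int or float): end time
--         wnd_size (int or float): window size in milleseconds
--
--     Returns:
--         float, int, int: end time of the window, end time sequence number of the window, error code
--     '''
--     end_wnd_time = -1
--     end_wnd_seq = -1
--     error = -1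
--     if time_list[start_wnd_seq] != start_wnd_time:
--         return end_wnd_time, end_wnd_seq, error - 2
--     for ii, tt in enumerate(time_list[start_wnd_seq:]):
--         if tt >= end_time:
--             return end_wnd_time, end_wnd_seq, error - 1
--         if tt >= start_wnd_time + wnd_size:
--             end_wnd_time = tt
--             end_wnd_seq = ii + start_wnd_seq
--             error = 0
--             return end_wnd_time, end_wnd_seq, error
--     return end_wnd_time, end_wnd_seq, error
-- ===== SOURCE B (Python) =====
-- def _first_at_least(seq, thresh):
--     for i, t in enumerate(seq):
--         if t >= thresh:
--             return i, t
--     return None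
--
--
-- def wnd_detect(time_list, start_wnd_time, start_wnd_seq, end_time, wnd_size):
--     if time_list[start_wnd_seq] != start_wnd_time:
--         return -1, -1, -3
--     tail = time_list[start_wnd_seq:]
--     hit_end = _first_at_least(tail, end_time)
--     hit_wnd = _first_at_least(tail, start_wnd_time + wnd_size)
--     if hit_end is not None and (hit_wnd is None or hit_end[0] <= hit_wnd[0]):
--         return -1, -1, -2
--     if hit_wnd is None:
--         return -1, -1, -1
--     i, t = hit_wnd
--     return t, i + start_wnd_seq, 0
-- ===== Notes on version B (the rewrite author's own statement) =====
-- stated objective: alternative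
-- what changed: B performs two independent staged searches over the suffix (first point >= end_time and first point >= start_wnd_time+wnd_size) and classifies by comparing the two found indices, instead of A's single loop that tests both thresholds on each element.
import Mathlib
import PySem

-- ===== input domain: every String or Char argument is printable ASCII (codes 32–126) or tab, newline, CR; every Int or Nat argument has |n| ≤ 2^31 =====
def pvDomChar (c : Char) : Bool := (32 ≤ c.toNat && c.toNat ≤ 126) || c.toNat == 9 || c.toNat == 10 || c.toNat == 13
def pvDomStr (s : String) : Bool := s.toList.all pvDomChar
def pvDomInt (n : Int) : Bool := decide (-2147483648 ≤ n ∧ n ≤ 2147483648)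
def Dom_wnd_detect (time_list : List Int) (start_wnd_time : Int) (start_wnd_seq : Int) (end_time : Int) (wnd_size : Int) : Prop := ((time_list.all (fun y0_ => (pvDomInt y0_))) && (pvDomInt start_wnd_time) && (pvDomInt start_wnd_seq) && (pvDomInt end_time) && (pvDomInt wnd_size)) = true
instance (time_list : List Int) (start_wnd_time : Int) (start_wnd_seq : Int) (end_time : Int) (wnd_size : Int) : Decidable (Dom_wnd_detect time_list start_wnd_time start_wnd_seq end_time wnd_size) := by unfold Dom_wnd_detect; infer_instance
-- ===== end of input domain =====

-- B replaces A's single two-test loop by two independent staged searches over the suffix (first point ≥ end_time, first point ≥ start_wnd_time+wnd_size) combined by comparing the found indices (objective: alternative decomposition, same cost).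

-- ===== PORT A =====
-- the 'for ii, tt in enumerate(time_list[start_wnd_seq:])' loop of A
def wndLoopA (s swt et ws : Int) : List (Int × Int) → Int × Int × Int
  | [] => (-1, -1, -1)
  | (ii, tt) :: rest =>
    if tt ≥ et then (-1, -1, -2)
    else if tt ≥ swt + ws then (tt, ii + s, 0)
    else wndLoopA s swt et ws rest

def wnd_detect (time_list : List Int) (start_wnd_time : Int) (start_wnd_seq : Int) (end_time : Int) (wnd_size : Int) : Int × Int × Int :=
  match PySem.List.pyGet? time_list start_wnd_seq with
  | none => (-1, -1, -1)  -- unreachable under Pre_ (Python raises IndexError here)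
  | some x =>
    if x ≠ start_wnd_time then (-1, -1, -3)
    else wndLoopA start_wnd_seq start_wnd_time end_time wnd_size
      (PySem.List.enumerate (PySem.List.slice time_list (some start_wnd_seq) none) 0)

-- ===== PORT B =====
-- Source B's helper _first_at_least: first (index, value) with value ≥ thresh, over an enumerated list
def firstAtLeast (thresh : Int) : List (Int × Int) → Option (Int × Int)
  | [] => none
  | (i, t) :: rest => if t ≥ thresh then some (i, t) else firstAtLeast thresh rest

def wnd_detect_alt (time_list : List Int) (start_wnd_time : Int) (start_wnd_seq : Int) (end_time : Int) (wnd_size : Int) : Int × Int × Int :=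
  match PySem.List.pyGet? time_list start_wnd_seq with
  | none => (-1, -1, -1)  -- unreachable under Pre_ (Python raises IndexError here)
  | some x =>
    if x ≠ start_wnd_time then (-1, -1, -3)
    else
      let tail := PySem.List.slice time_list (some start_wnd_seq) none
      let hitEnd := firstAtLeast end_time (PySem.List.enumerate tail 0)
      let hitWnd := firstAtLeast (start_wnd_time + wnd_size) (PySem.List.enumerate tail 0)
      if (match hitEnd, hitWnd with
          | some _, none => true
          | some e, some w => e.1 ≤ w.1
          | none, _ => false) then (-1, -1, -2)
      else
        match hitWnd with
        | none => (-1, -1, -1)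
        | some (i, t) => (t, i + start_wnd_seq, 0)

-- ===== PRECONDITION & SPEC =====
-- Pre_ excludes only out-of-range start_wnd_seq (after Python's negative-index rule), where A raises IndexError.
def Pre_wnd_detect (time_list : List Int) (start_wnd_time : Int) (start_wnd_seq : Int) (end_time : Int) (wnd_size : Int) : Prop :=
  -(time_list.length : Int) ≤ start_wnd_seq ∧ start_wnd_seq < time_list.length
instance (time_list : List Int) (start_wnd_time : Int) (start_wnd_seq : Int) (end_time : Int) (wnd_size : Int) : Decidable (Pre_wnd_detect time_list start_wnd_time start_wnd_seq end_time wnd_size) := by unfold Pre_wnd_detect; infer_instance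

def pvWitness_wnd_detect : List Int × Int × Int × Int × Int := ([5, 10, 20, 30], 10, 1, 100, 5)

def Spec_wnd_detect (time_list : List Int) (start_wnd_time : Int) (start_wnd_seq : Int) (end_time : Int) (wnd_size : Int) (out : Int × Int × Int) : Prop := out = wnd_detect_alt time_list start_wnd_time start_wnd_seq end_time wnd_size
instance (time_list : List Int) (start_wnd_time : Int) (start_wnd_seq : Int) (end_time : Int) (wnd_size : Int) (out : Int × Int × Int) : Decidable (Spec_wnd_detect time_list start_wnd_time start_wnd_seq end_time wnd_size out) := by unfold Spec_wnd_detect; infer_instance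

-- ===== CLAIM =====
def Claim_equal_wnd_detect : Prop := ∀ (time_list : List Int) (start_wnd_time : Int) (start_wnd_seq : Int) (end_time : Int) (wnd_size : Int), Dom_wnd_detect time_list start_wnd_time start_wnd_seq end_time wnd_size → Pre_wnd_detect time_list start_wnd_time start_wnd_seq end_time wnd_size → Spec_wnd_detect time_list start_wnd_time start_wnd_seq end_time wnd_size (wnd_detect time_list start_wnd_time start_wnd_seq end_time wnd_size)

-- ===== LEMMAS AND PROOFS =====

-- B's combine step, factored out for the key lemma
def wndCombineB (s : Int) : Option (Int × Int) → Option (Int × Int) → Int × Int × Int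
  | he, hw =>
    if (match he, hw with
        | some _, none => true
        | some e, some w => e.1 ≤ w.1
        | none, _ => false) then (-1, -1, -2)
    else
      match hw with
      | none => (-1, -1, -1)
      | some (i, t) => (t, i + s, 0)

-- a hit found in 'enumerate l k' has index ≥ k
lemma firstAtLeast_ge (th : Int) (l : List Int) (k : Int) (p : Int × Int)
    (h : firstAtLeast th (PySem.List.enumerate l k) = some p) : k ≤ p.1 := by
  induction l generalizing k with
  | nil => simp [PySem.List.enumerate, firstAtLeast] at h
  | cons t rest ih =>
    rw [PySem.List.enumerate_cons] at h
    unfold firstAtLeast at h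
    split_ifs at h with ht
    · cases h; simp
    · have := ih (k + 1) h; omega

-- A's loop over an enumerated suffix equals B's two searches combined
lemma wnd_key (s swt et ws : Int) (l : List Int) (k : Int) :
    wndLoopA s swt et ws (PySem.List.enumerate l k)
      = wndCombineB s (firstAtLeast et (PySem.List.enumerate l k))
          (firstAtLeast (swt + ws) (PySem.List.enumerate l k)) := by
  induction l generalizing k with
  | nil => simp [PySem.List.enumerate, wndLoopA, firstAtLeast, wndCombineB]
  | cons t rest ih =>
    rw [PySem.List.enumerate_cons]
    unfold wndLoopA firstAtLeast
    by_cases h1 : t ≥ et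
    · rw [if_pos h1, if_pos h1]
      by_cases h2 : t ≥ swt + ws
      · simp [h2, wndCombineB]
      · rw [if_neg h2]
        cases hw : firstAtLeast (swt + ws) (PySem.List.enumerate rest (k + 1)) with
        | none => simp [wndCombineB]
        | some w =>
          have := firstAtLeast_ge (swt + ws) rest (k + 1) w hw
          simp [wndCombineB, (by omega : k ≤ w.1)]
    · rw [if_neg h1, if_neg h1]
      by_cases h2 : t ≥ swt + ws
      · rw [if_pos h2, if_pos h2]
        cases he : firstAtLeast et (PySem.List.enumerate rest (k + 1)) with
        | none => simp [wndCombineB]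
        | some e =>
          have := firstAtLeast_ge et rest (k + 1) e he
          simp [wndCombineB]
          omega
      · rw [if_neg h2, if_neg h2]
        exact ih (k + 1)

-- ===== VERDICT =====
theorem wnd_detect_spec : Claim_equal_wnd_detect := by
  intro tl swt s et ws _hdom _hpre
  unfold Spec_wnd_detect wnd_detect wnd_detect_alt
  cases hget : PySem.List.pyGet? tl s with
  | none => rfl
  | some x =>
    by_cases hx : x ≠ swt
    · simp [hx]
    · simp only [hx, if_false]
      rw [wnd_key]
      rfl
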